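-- pv_equiv track=rewrite | github.com/Wundrfull/godauto | src/auto_godot/formats/common.py | _count_bracket_depth
-- ===== SOURCE A (Python) =====
-- def _count_bracket_depth(text: str) -> int:
--     """Count net bracket depth in text, ignoring brackets inside strings.
--
--     Tracks {, [, ( as openers and }, ], ) as closers.
--     Handles escaped quotes inside double-quoted strings.
--     """
--     depth = 0
--     in_string = False
--     i = 0
--     length = len(text)
--     while i < length:
--         ch = text[i]
--         if in_string:
--             if ch == "\\" and i + 1 < length:
--                 i += 2  # skip escaped character
--                 continue
--             if ch == '"':
--                 in_string = False
--         else: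
--             if ch == '"':
--                 in_string = True
--             elif ch in ("{", "[", "("):
--                 depth += 1
--             elif ch in ("}", "]", ")"):
--                 depth -= 1
--         i += 1
--     return depth
-- ===== SOURCE B (Python) =====
-- def _count_bracket_depth(text: str) -> int:
--     """Chunked find/slice/count scan: no per-character state machine.
--
--     Outside strings, jump straight to the next quote with str.find and count
--     the brackets of the whole slice at once; inside strings, jump between the
--     first backslash and first quote positions to skip the literal.
--     """
--     depth = 0
--     i = 0
--     while True:
--         q = text.find('"', i)
--         chunk = text[i:] if q == -1 else text[i:q]
--         depth += (chunk.count("{") + chunk.count("[") + chunk.count("(")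
--                   - chunk.count("}") - chunk.count("]") - chunk.count(")"))
--         if q == -1:
--             return depth
--         i = q + 1
--         while True:
--             c = text.find('"', i)
--             if c == -1:
--                 return depth
--             b = text.find("\\", i)
--             if b != -1 and b < c:
--                 i = b + 2
--             else:
--                 i = c + 1
--                 break
-- ===== Notes on version B (the rewrite author's own statement) =====
-- stated objective: faster
-- what changed: B drops A's per-character in_string/escape state machine entirely: outside strings it uses str.find to jump to the next quote and counts all brackets of the whole slice at once with str.count, and inside strings it jumps directly between the first-backslash and first-quote positions returned by str.find to skip the literal.
import Mathlib
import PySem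

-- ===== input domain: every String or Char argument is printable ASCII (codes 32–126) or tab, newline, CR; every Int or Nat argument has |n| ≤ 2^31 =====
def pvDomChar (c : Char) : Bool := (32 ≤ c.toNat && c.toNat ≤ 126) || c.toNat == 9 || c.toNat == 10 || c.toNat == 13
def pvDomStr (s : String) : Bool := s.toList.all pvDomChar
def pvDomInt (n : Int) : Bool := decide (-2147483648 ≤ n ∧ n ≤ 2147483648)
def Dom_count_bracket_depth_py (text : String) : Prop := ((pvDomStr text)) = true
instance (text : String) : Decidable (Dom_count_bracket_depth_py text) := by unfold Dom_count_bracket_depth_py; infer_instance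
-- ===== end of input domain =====

-- B replaces A's per-character state machine by a chunked find/slice/count scan
-- (measurably faster in Python: the work moves into C-level str.find/str.count):
-- outside strings it jumps to the next quote and counts the whole slice's brackets at
-- once; inside strings it jumps between first-backslash/first-quote positions.


-- ===== PORT A =====
-- A's while loop over indices, rendered as recursion on the remaining characters:
-- the state is (in_string, depth); 'i += 2; continue' consumes two characters.
def cbdA : Bool → Int → List Char → Int
  | _, depth, [] => depth
  | in_string, depth, ch :: rest =>
    if in_string then
      if ch = '\\' ∧ rest ≠ [] then cbdA in_string depth rest.tail
      else if ch = '"' then cbdA false depth rest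
      else cbdA in_string depth rest
    else
      if ch = '"' then cbdA true depth rest
      else if ch = '{' ∨ ch = '[' ∨ ch = '(' then cbdA in_string (depth + 1) rest
      else if ch = '}' ∨ ch = ']' ∨ ch = ')' then cbdA in_string (depth - 1) rest
      else cbdA in_string depth rest
termination_by _ _ l => l.length
decreasing_by all_goals (simp [List.length_tail]; try omega)

def count_bracket_depth_py (text : String) : Int := cbdA false 0 text.toList

-- ===== PORT B =====
-- Source B works on the suffix of the text from the current index i; here that suffix IS
-- the list argument, so "text.find(c, i)" becomes findIdx? on the suffix (exact:
-- Python's relative offsets q-i, b-i, c-i are what findIdx? returns) and the slice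
-- text[i:q] becomes takeWhile/dropWhile at the first quote.
mutual
-- outer loop body: jump to the next quote, count the whole chunk's brackets at once
def cbdOut (depth : Int) (l : List Char) : Int :=
  let chunk := l.takeWhile (· ≠ '"')
  let depth := depth + (PySem.List.count chunk '{' + PySem.List.count chunk '['
      + PySem.List.count chunk '(' - PySem.List.count chunk '}'
      - PySem.List.count chunk ']' - PySem.List.count chunk ')')
  match h : l.dropWhile (· ≠ '"') with
  | [] => depth                       -- q == -1
  | _ :: tl => cbdIn depth tl         -- i = q + 1
termination_by (l.length, 1)
decreasing_by
  · have := List.length_dropWhile_le (p := fun c => decide (¬ c = '"')) (l := l)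
    rw [h] at this; simp at this ⊢; omega
-- inner loop: skip the string literal via first-backslash / first-quote positions
def cbdIn (depth : Int) (l : List Char) : Int :=
  match hc : l.findIdx? (· = '"') with
  | none => depth                     -- c == -1
  | some c =>
    match l.findIdx? (· = '\\') with
    | some b =>
      if b < c then cbdIn depth (l.drop (b + 2))       -- i = b + 2
      else cbdOut depth (l.drop (c + 1))               -- i = c + 1, break
    | none => cbdOut depth (l.drop (c + 1))
termination_by (l.length, 0)
decreasing_by all_goals
  (have hlt : c < l.length := List.findIdx?_eq_some_iff_findIdx_eq.mp hc |>.1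
   simp; omega)
end

def count_bracket_depth_py_alt (text : String) : Int := cbdOut 0 text.toList

-- ===== PRECONDITION & SPEC =====
def Spec_count_bracket_depth_py (text : String) (out : Int) : Prop := out = count_bracket_depth_py_alt text
instance (text : String) (out : Int) : Decidable (Spec_count_bracket_depth_py text out) := by unfold Spec_count_bracket_depth_py; infer_instance

-- ===== CLAIM (what is proved, stated in full; the proofs are below) =====
def Claim_equal_count_bracket_depth_py : Prop := ∀ (text : String), Dom_count_bracket_depth_py text → Spec_count_bracket_depth_py text (count_bracket_depth_py text)

-- ===== LEMMAS AND PROOFS =====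

-- the net bracket value B assigns to a chunk
def cbdNet (bs : List Char) : Int :=
  PySem.List.count bs '{' + PySem.List.count bs '[' + PySem.List.count bs '('
  - PySem.List.count bs '}' - PySem.List.count bs ']' - PySem.List.count bs ')'

theorem cbdNet_nil : cbdNet [] = 0 := by decide

theorem cbdNet_cons (c : Char) (bs : List Char) :
    cbdNet (c :: bs) = cbdNet bs
      + (if c = '{' ∨ c = '[' ∨ c = '(' then 1
         else if c = '}' ∨ c = ']' ∨ c = ')' then -1 else 0) := by
  simp only [cbdNet, PySem.List.count, List.count_cons]
  by_cases h1 : c = '{' <;> by_cases h2 : c = '[' <;> by_cases h3 : c = '(' <;>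
    by_cases h4 : c = '}' <;> by_cases h5 : c = ']' <;> by_cases h6 : c = ')' <;>
    simp_all <;> ring

theorem dropWhile_cons_spec {a : Type} (p : a → Bool) :
    ∀ (l : List a) (x : a) (tl : List a), l.dropWhile p = x :: tl → p x = false ∧ x ∈ l := by
  intro l
  induction l with
  | nil => simp [List.dropWhile]
  | cons y ys ih =>
    intro x tl h
    rw [List.dropWhile_cons] at h
    by_cases hp : p y
    · simp [hp] at h
      obtain ⟨h1, h2⟩ := ih x tl h
      exact ⟨h1, by simp [h2]⟩
    · simp [hp] at h
      obtain ⟨rfl, rfl⟩ := h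
      exact ⟨by simpa using hp, by simp⟩

theorem cbdOut_eq (depth : Int) (l : List Char) :
    cbdOut depth l =
      (if '"' ∈ l then
        cbdIn (depth + cbdNet (l.takeWhile (· ≠ '"'))) ((l.dropWhile (· ≠ '"')).tail)
       else depth + cbdNet (l.takeWhile (· ≠ '"'))) := by
  rw [cbdOut]
  rcases h : l.dropWhile (· ≠ '"') with _ | ⟨x, tl⟩
  · have hq : ∀ y ∈ l, y ≠ '"' := by
      intro y hy
      simpa using List.dropWhile_eq_nil_iff.mp h y hy
    rw [if_neg (fun hm => hq _ hm rfl)]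
    simp [cbdNet]
    try ring
  · obtain ⟨hpx, hxl⟩ := dropWhile_cons_spec _ l x tl h
    have hx : x = '"' := by simpa using hpx
    rw [if_pos (hx ▸ hxl)]
    simp [cbdNet]
    try ring

-- A, in string mode, ignores a prefix with no backslash and no quote
theorem cbdA_true_skip (pre suf : List Char) (d : Int)
    (h : ∀ c ∈ pre, c ≠ '\\' ∧ c ≠ '"') :
    cbdA true d (pre ++ suf) = cbdA true d suf := by
  induction pre with
  | nil => rfl
  | cons ch pre ih =>
    have hch := h ch (by simp)
    rw [List.cons_append, cbdA]
    rw [if_pos rfl, if_neg (by simp [hch.1]), if_neg hch.2]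
    exact ih (fun c hc => h c (by simp [hc]))

-- A, in string mode, returns the depth unchanged when no quote remains
theorem cbdA_true_no_quote : ∀ (l : List Char), '"' ∉ l → ∀ d, cbdA true d l = d
  | [], _, d => by simp [cbdA]
  | ch :: rest, h, d => by
    have hne : ch ≠ '"' := by intro he; exact h (by simp [he])
    rw [cbdA, if_pos rfl]
    by_cases hb : ch = '\\' ∧ rest ≠ []
    · rw [if_pos hb]
      exact cbdA_true_no_quote rest.tail
        (fun hm => h (by simp [List.mem_of_mem_tail hm])) d
    · rw [if_neg hb, if_neg hne]
      exact cbdA_true_no_quote rest (fun hm => h (by simp [hm])) d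
termination_by l => l.length
decreasing_by all_goals (simp [List.length_tail]; try omega)

-- facts extracted from findIdx? = some i
theorem findIdx?_spec {α : Type} [Inhabited α] (p : α → Bool) :
    ∀ (l : List α) (i : Nat), l.findIdx? p = some i →
      i < l.length ∧ p l[i]! = true ∧ ∀ c ∈ l.take i, p c = false := by
  intro l
  induction l with
  | nil => intro i h; simp at h
  | cons x xs ih =>
    intro i h
    rw [List.findIdx?_cons] at h
    by_cases hp : p x
    · simp [hp] at h
      subst h
      exact ⟨by simp, by simpa using hp, by simp⟩
    · simp [hp] at h
      rcases h with ⟨j, hj, rfl⟩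
      obtain ⟨h1, h2, h3⟩ := ih j hj
      refine ⟨by simp; omega, by simpa using h2, ?_⟩
      intro c hc
      rw [List.take_succ_cons] at hc
      rcases List.mem_cons.mp hc with rfl | hc
      · simpa using hp
      · exact h3 c hc

-- main equivalence, both modes at once, strong induction on the length
theorem cbdA_eq_main : ∀ (n : Nat) (l : List Char), l.length ≤ n →
    (∀ d, cbdA false d l = cbdOut d l) ∧ (∀ d, cbdA true d l = cbdIn d l) := by
  intro n
  induction n with
  | zero =>
    intro l hl
    have : l = [] := List.eq_nil_of_length_eq_zero (by omega)
    subst this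
    constructor <;> intro d
    · rw [cbdOut_eq]; simp [cbdA, cbdNet_nil]
    · rw [cbdIn]; simp [cbdA]
  | succ n ih =>
    intro l hl
    constructor
    · -- outside-string mode
      intro d
      rcases l with _ | ⟨ch, rest⟩
      · rw [cbdOut_eq]
        simp [cbdA, cbdNet_nil]
      · have hr : rest.length ≤ n := by simp at hl; omega
        have heq : ∀ d', cbdA false d' rest = cbdOut d' rest := (ih rest hr).1
        by_cases hq : ch = '"'
        · subst hq
          rw [cbdA, if_neg (by simp), if_pos rfl, cbdOut_eq, if_pos (by simp)]
          simp [cbdNet_nil, (ih rest hr).2 d]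
        · have hmm : ('"' ∈ ch :: rest) = ('"' ∈ rest) := by
            have hne : ¬ ('"' = ch) := fun h => hq h.symm
            simp [List.mem_cons, hne]
          have htk : (ch :: rest).takeWhile (· ≠ '"') = ch :: rest.takeWhile (· ≠ '"') := by
            simp [hq]
          have hdw : (ch :: rest).dropWhile (· ≠ '"') = rest.dropWhile (· ≠ '"') := by
            simp [hq]
          rw [cbdA, if_neg (by simp), if_neg hq]
          by_cases h1 : ch = '{' ∨ ch = '[' ∨ ch = '('
          · rw [if_pos h1, heq, cbdOut_eq, cbdOut_eq]
            simp only [hmm, htk, hdw]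
            rw [cbdNet_cons, if_pos h1]
            by_cases hm : '"' ∈ rest
            · rw [if_pos hm, if_pos hm]; ring_nf
            · rw [if_neg hm, if_neg hm]; ring
          · rw [if_neg h1]
            by_cases h2 : ch = '}' ∨ ch = ']' ∨ ch = ')'
            · rw [if_pos h2, heq, cbdOut_eq, cbdOut_eq]
              simp only [hmm, htk, hdw]
              rw [cbdNet_cons, if_neg h1, if_pos h2]
              by_cases hm : '"' ∈ rest
              · rw [if_pos hm, if_pos hm]; ring_nf
              · rw [if_neg hm, if_neg hm]; ring
            · rw [if_neg h2, heq, cbdOut_eq, cbdOut_eq]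
              simp only [hmm, htk, hdw]
              rw [cbdNet_cons, if_neg h1, if_neg h2]
              by_cases hm : '"' ∈ rest
              · rw [if_pos hm, if_pos hm]; ring_nf
              · rw [if_neg hm, if_neg hm]; ring
    · -- inside-string mode
      intro d
      rw [cbdIn]
      split
      · -- no quote remains
        rename_i hc
        have : '"' ∉ l := by
          intro hm
          have := List.findIdx?_eq_none_iff.mp hc '"' hm
          simp at this
        exact cbdA_true_no_quote l this d
      · rename_i c hc
        obtain ⟨hclt, hcq, hcpre⟩ := findIdx?_spec _ l c hc
        have hcq' : l[c]! = '"' := by simpa using hcq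
        have hnoq : ∀ x ∈ l.take c, x ≠ '"' := by
          intro x hx; have := hcpre x hx; simpa using this
        have hdecq : l = l.take c ++ ('"' :: l.drop (c + 1)) := by
          conv_lhs => rw [← List.take_append_drop c l]
          rw [← List.getElem_cons_drop hclt]
          simp [List.getElem!_eq_getElem?_getD, List.getElem?_eq_getElem hclt] at hcq'
          rw [hcq']
        split
        · -- a backslash exists
          rename_i b hb
          obtain ⟨hblt, hbq, hbpre⟩ := findIdx?_spec _ l b hb
          have hbq' : l[b]! = '\\' := by simpa using hbq
          by_cases hbc : b < c
          · -- backslash first: skip two characters, stay in string mode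
            rw [if_pos hbc]
            have hnob : ∀ x ∈ l.take b, x ≠ '\\' := by
              intro x hx; have := hbpre x hx; simpa using this
            have hnoq' : ∀ x ∈ l.take b, x ≠ '"' := by
              intro x hx
              have hbc' : l.take b = (l.take c).take b := by
                rw [List.take_take, Nat.min_eq_left (le_of_lt hbc)]
              rw [hbc'] at hx
              exact hnoq x (List.mem_of_mem_take hx)
            have hdec : l = l.take b ++ ('\\' :: l.drop (b + 1)) := by
              conv_lhs => rw [← List.take_append_drop b l]
              rw [← List.getElem_cons_drop hblt]
              simp [List.getElem!_eq_getElem?_getD, List.getElem?_eq_getElem hblt] at hbq'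
              rw [hbq']
            conv_lhs => rw [hdec]
            rw [cbdA_true_skip _ _ _ (fun x hx => ⟨hnob x hx, hnoq' x hx⟩)]
            have hne : l.drop (b + 1) ≠ [] := by
              intro he
              have : l.length - (b + 1) = 0 := by rw [← List.length_drop, he]; rfl
              omega
            rw [cbdA, if_pos rfl, if_pos ⟨rfl, hne⟩, List.tail_drop,
              show b + 1 + 1 = b + 2 by omega]
            have hlen : (l.drop (b + 2)).length ≤ n := by simp; omega
            exact (ih _ hlen).2 d
          · -- quote first
            rw [if_neg hbc]
            have hnob : ∀ x ∈ l.take c, x ≠ '\\' := by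
              intro x hx hxe
              have hcb' : l.take c = (l.take b).take c := by
                rw [List.take_take, Nat.min_eq_left (by omega : c ≤ b)]
              have hxtb : x ∈ l.take b := by
                rw [hcb'] at hx
                exact List.mem_of_mem_take hx
              have := hbpre x hxtb
              simp [hxe] at this
            conv_lhs => rw [hdecq]
            rw [cbdA_true_skip _ _ _ (fun x hx => ⟨hnob x hx, hnoq x hx⟩)]
            rw [cbdA, if_pos rfl, if_neg (by simp), if_pos rfl]
            have hlen : (l.drop (c + 1)).length ≤ n := by simp; omega
            exact (ih _ hlen).1 d
        · -- no backslash: scan to the quote, leave string mode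
          rename_i hb
          have hnob : ∀ x ∈ l.take c, x ≠ '\\' := by
            intro x hx hxe
            have := List.findIdx?_eq_none_iff.mp hb x (List.mem_of_mem_take hx)
            simp [hxe] at this
          conv_lhs => rw [hdecq]
          rw [cbdA_true_skip _ _ _ (fun x hx => ⟨hnob x hx, hnoq x hx⟩)]
          rw [cbdA, if_pos rfl, if_neg (by simp), if_pos rfl]
          have hlen : (l.drop (c + 1)).length ≤ n := by simp; omega
          exact (ih _ hlen).1 d

-- ===== VERDICT (by name: the statement is the Claim_ definition above) =====
theorem count_bracket_depth_py_spec : Claim_equal_count_bracket_depth_py := by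
  intro text _
  unfold Spec_count_bracket_depth_py count_bracket_depth_py count_bracket_depth_py_alt
  exact (cbdA_eq_main text.toList.length text.toList le_rfl).1 0
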